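-- pv_equiv track=rewrite | github.com/hanvota/AoC-2017 | Day-04/Day-04.py | passphrase_1
-- ===== SOURCE A (Python) =====
-- def passphrase_1(data: list) -> int:
--     count = 0
--     for input_line in data:
--         line_list = input_line.split(' ')
--         line_set = set(line_list)
--         if len(line_list) == len(line_set):
--             count += 1
--
--     return count
-- ===== SOURCE B (Python) =====
-- def _distinct(ws):
--     # ws is sorted; recursively check no adjacent pair is equal
--     if len(ws) < 2:
--         return True
--     return ws[0] != ws[1] and _distinct(ws[1:])
--
--
-- def passphrase_1(data: list) -> int:
--     return sum(1 for line in data if _distinct(sorted(line.split(' '))))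
-- ===== Notes on version B (the rewrite author's own statement) =====
-- stated objective: alternative
-- what changed: Instead of a counter loop with a per-line set/length comparison, B counts with a generator-sum the lines whose sorted word list has no equal adjacent pair, checked by a recursive helper.
import Mathlib
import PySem

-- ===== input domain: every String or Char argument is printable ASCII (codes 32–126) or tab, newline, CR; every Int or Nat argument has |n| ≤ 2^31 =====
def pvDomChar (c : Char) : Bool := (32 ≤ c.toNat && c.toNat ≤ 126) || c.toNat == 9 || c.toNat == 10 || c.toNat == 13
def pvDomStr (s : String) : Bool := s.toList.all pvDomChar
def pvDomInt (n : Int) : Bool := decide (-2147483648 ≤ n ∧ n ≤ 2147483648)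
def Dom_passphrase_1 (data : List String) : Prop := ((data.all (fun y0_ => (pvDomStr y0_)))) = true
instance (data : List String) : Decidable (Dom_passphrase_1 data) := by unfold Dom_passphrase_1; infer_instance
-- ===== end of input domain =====

-- B counts the valid lines with a count-of-predicate over the list instead of A's counter loop,
-- and detects duplicates by a recursive adjacent-pair scan of the sorted word list instead of
-- A's set/length comparison (objective: alternative).

-- ===== PORT A =====
def passphrase_1 (data : List String) : Int :=
  data.foldl (fun count input_line =>
    let line_list := (PySem.Str.split? input_line " ").getD []
    let line_set : PySem.Set String := PySem.Set.ofList line_list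
    if (line_list.length : Int) == PySem.Set.len line_set then count + 1 else count) 0

-- ===== PORT B =====
-- recursive helper _distinct: true iff no two adjacent elements are equal
def pvDistinct : List String → Bool
  | [] => true
  | [_] => true
  | a :: b :: t => (a != b) && pvDistinct (b :: t)

-- sum(1 for line in data if _distinct(sorted(line.split(' ')))) = count of lines passing the test
def passphrase_1_alt (data : List String) : Int :=
  (data.countP (fun line =>
      pvDistinct (PySem.List.sorted ((PySem.Str.split? line " ").getD []) (fun x => x) false)) : Int)

-- ===== PRECONDITION & SPEC =====
def Spec_passphrase_1 (data : List String) (out : Int) : Prop := out = passphrase_1_alt data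
instance (data : List String) (out : Int) : Decidable (Spec_passphrase_1 data out) := by unfold Spec_passphrase_1; infer_instance

-- ===== CLAIM =====
def Claim_equal_passphrase_1 : Prop := ∀ (data : List String), Dom_passphrase_1 data → Spec_passphrase_1 data (passphrase_1 data)

-- ===== LEMMAS AND PROOFS =====

-- A's test: len(set(ws)) == len(ws) iff ws has no duplicates
theorem ofList_len_eq_iff_nodup (ws : List String) :
    (PySem.Set.ofList ws).length = ws.length ↔ ws.Nodup := by
  constructor
  · intro h
    have hsub : (PySem.Set.ofList ws : List String) ⊆ ws.dedup := by
      intro x hx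
      exact List.mem_dedup.mpr ((PySem.Set.mem_ofList ws x).mp hx)
    have h1 : (PySem.Set.ofList ws : List String).length ≤ ws.dedup.length :=
      ((PySem.Set.nodup_ofList ws).subperm hsub).length_le
    have h2 : ws.dedup.Sublist ws := List.dedup_sublist ws
    have h3 : ws.dedup = ws := h2.eq_of_length (le_antisymm h2.length_le (h ▸ h1))
    exact List.dedup_eq_self.mp h3
  · intro h
    rw [PySem.Set.ofList_eq_self_of_nodup ws h]

-- B's test: a sorted list has no equal adjacent pair iff it is Nodup
theorem pvDistinct_iff_nodup (l : List String) (hp : l.Pairwise (· ≤ ·)) :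
    pvDistinct l = true ↔ l.Nodup := by
  induction l with
  | nil => simp [pvDistinct]
  | cons a t ih =>
    cases t with
    | nil => simp [pvDistinct]
    | cons b t' =>
      have hab : a ≤ b := (List.pairwise_cons.mp hp).1 b (by simp)
      have hp' : (b :: t').Pairwise (· ≤ ·) := (List.pairwise_cons.mp hp).2
      have hble : ∀ x ∈ t', b ≤ x := (List.pairwise_cons.mp hp').1
      rw [show pvDistinct (a :: b :: t') = ((a != b) && pvDistinct (b :: t')) from rfl,
        Bool.and_eq_true_iff]
      constructor
      · intro ⟨hne, hrest⟩
        have hnd : (b :: t').Nodup := (ih hp').mp hrest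
        refine List.nodup_cons.mpr ⟨?_, hnd⟩
        intro hmem
        have hne' : a ≠ b := by simpa using hne
        rcases List.mem_cons.mp hmem with h' | h'
        · exact hne' h'
        · exact hne' (le_antisymm hab (hble a h'))
      · intro h
        have hnd := List.nodup_cons.mp h
        refine ⟨?_, (ih hp').mpr hnd.2⟩
        have : a ≠ b := fun he => hnd.1 (he ▸ List.mem_cons_self)
        simpa using this

-- the per-line tests agree
theorem step_eq (ws : List String) :
    (((ws.length : Int)) == PySem.Set.len (PySem.Set.ofList ws)) =
    pvDistinct (PySem.List.sorted ws (fun x => x) false) := by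
  have hperm : (PySem.List.sorted ws (fun x : String => x) false).Perm ws :=
    PySem.List.sorted_perm ws _ _
  have hp : (PySem.List.sorted ws (fun x : String => x) false).Pairwise (· ≤ ·) := by
    simpa using PySem.List.sorted_pairwise ws (fun x : String => x)
  rw [Bool.eq_iff_iff, pvDistinct_iff_nodup _ hp, hperm.nodup_iff, beq_iff_eq, PySem.Set.len]
  rw [← ofList_len_eq_iff_nodup ws]
  constructor
  · intro h; exact_mod_cast h.symm
  · intro h; exact_mod_cast h.symm

-- A's counter loop equals a predicate count
theorem foldl_count (p : String → Bool) (data : List String) (c : Int) :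
    data.foldl (fun count l => if p l then count + 1 else count) c
      = c + (data.countP p : Int) := by
  induction data generalizing c with
  | nil => simp
  | cons a t ih =>
    simp only [List.foldl_cons, List.countP_cons, ih]
    by_cases h : p a = true <;> simp [h, Int.add_comm, Int.add_assoc, Int.add_left_comm]

-- ===== VERDICT =====
theorem passphrase_1_spec : Claim_equal_passphrase_1 := by
  intro data _
  show passphrase_1 data = passphrase_1_alt data
  unfold passphrase_1 passphrase_1_alt
  simp only [step_eq]
  rw [foldl_count]
  simp
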